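-- pv_equiv track=rewrite | github.com/permCoding/algopro21 | part2/04-list_files/01-subsets/11.py | get_sorted_subsets
-- ===== SOURCE A (Python) =====
-- def get_sorted_subsets(lst):
--     n = len(lst)
--     count = 2**n
--     subsets = []
--     for comb in range(count):
--         cur = []
--         for pos in range(n):
--             if (comb & (1 << pos)) > 0:
--                 cur.append(lst[pos])
--         subsets.append(cur)
--     return sorted(subsets, key=len)
-- ===== SOURCE B (Python) =====
-- def get_sorted_subsets(lst):
--     result = [[]]
--     for x in lst:
--         result = result + [s + [x] for s in result]
--     return sorted(result, key=len)
-- ===== Notes on version B (the rewrite author's own statement) =====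
-- stated objective: idiomatic
-- what changed: Replaces the bitmask decoding double loop (each of the 2^n counters re-scanned bit by bit) with incremental subset doubling: the result starts as the list containing only the empty subset and, for each element, is extended by copies of every current subset with that element appended; this pre-sort order coincides with A's bitmask order, so the stable length sort gives identical output.
import Mathlib
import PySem

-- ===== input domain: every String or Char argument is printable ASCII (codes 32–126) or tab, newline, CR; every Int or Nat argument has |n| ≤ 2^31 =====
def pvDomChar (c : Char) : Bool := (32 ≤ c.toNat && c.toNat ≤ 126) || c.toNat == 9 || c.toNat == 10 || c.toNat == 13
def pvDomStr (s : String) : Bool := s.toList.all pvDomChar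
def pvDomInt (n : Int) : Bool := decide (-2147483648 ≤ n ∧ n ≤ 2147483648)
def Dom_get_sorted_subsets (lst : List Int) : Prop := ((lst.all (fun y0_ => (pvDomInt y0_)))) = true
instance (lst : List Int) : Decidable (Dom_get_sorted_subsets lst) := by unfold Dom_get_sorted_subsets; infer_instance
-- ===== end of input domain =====

-- B replaces A's bitmask decoding with incremental subset doubling (same output, same cost; more idiomatic).

-- ===== PORT A =====
-- inner loop of A: `for pos in range(n): if comb & (1 << pos) > 0: cur.append(lst[pos])`
-- (`lst[pos]` with 0 ≤ pos < len(lst) is always in range, so `getD … 0` is exact here)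
def pvMaskSubset (lst : List Int) (comb : Nat) : List Int :=
  (List.range lst.length).foldl
    (fun cur pos => if comb &&& (1 <<< pos) > 0 then cur ++ [lst.getD pos 0] else cur) []

def get_sorted_subsets (lst : List Int) : List (List Int) :=
  let count := 2 ^ lst.length
  let subsets := (List.range count).foldl (fun subsets comb => subsets ++ [pvMaskSubset lst comb]) []
  PySem.List.sorted subsets (fun s => (s.length : Int)) false

-- ===== PORT B =====
def get_sorted_subsets_alt (lst : List Int) : List (List Int) :=
  let result := lst.foldl (fun result x => result ++ result.map (fun s => s ++ [x])) [[]]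
  PySem.List.sorted result (fun s => (s.length : Int)) false

-- ===== PRECONDITION & SPEC =====
def Spec_get_sorted_subsets (lst : List Int) (out : List (List Int)) : Prop := out = get_sorted_subsets_alt lst
instance (lst : List Int) (out : List (List Int)) : Decidable (Spec_get_sorted_subsets lst out) := by unfold Spec_get_sorted_subsets; infer_instance

-- ===== CLAIM (what is proved, stated in full; the proofs are below) =====
def Claim_equal_get_sorted_subsets : Prop := ∀ (lst : List Int), Dom_get_sorted_subsets lst → Spec_get_sorted_subsets lst (get_sorted_subsets lst)

-- ===== LEMMAS AND PROOFS =====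

-- the bit test of A's inner loop, phrased via testBit
theorem pv_cond_testBit (c pos : Nat) : (c &&& (1 <<< pos) > 0) ↔ c.testBit pos = true := by
  rw [Nat.shiftLeft_eq, one_mul, Nat.and_two_pow]
  cases c.testBit pos <;> simp

theorem pv_testBit_low (c n i : Nat) (h : i < n) : (2 ^ n + c).testBit i = c.testBit i :=
  Nat.testBit_two_pow_add_gt h c

theorem pv_testBit_high (c n : Nat) (hc : c < 2 ^ n) : (2 ^ n + c).testBit n = true := by
  rw [Nat.testBit_two_pow_add_eq, Nat.testBit_lt_two_pow hc]
  rfl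

-- mask subsets of lst ++ [x], low half: combs below 2^n ignore the new last element
theorem pv_mask_lo (lst : List Int) (x : Int) (c : Nat) (hc : c < 2 ^ lst.length) :
    pvMaskSubset (lst ++ [x]) c = pvMaskSubset lst c := by
  unfold pvMaskSubset
  have hlen : (lst ++ [x]).length = lst.length + 1 := by simp
  rw [hlen, List.range_succ, List.foldl_append]
  simp only [List.foldl_cons, List.foldl_nil]
  rw [if_neg (by simp [pv_cond_testBit, Nat.testBit_lt_two_pow hc])]
  apply PySem.List.foldl_congr_mem
  intro acc pos hpos
  have hlt : pos < lst.length := List.mem_range.mp hpos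
  by_cases h : c &&& (1 <<< pos) > 0
  · simp [h, List.getElem?_append_left hlt]
  · simp [h]

-- mask subsets of lst ++ [x], high half: combs 2^n + c pick the subset of c plus x at the end
theorem pv_mask_hi (lst : List Int) (x : Int) (c : Nat) (hc : c < 2 ^ lst.length) :
    pvMaskSubset (lst ++ [x]) (2 ^ lst.length + c) = pvMaskSubset lst c ++ [x] := by
  unfold pvMaskSubset
  have hlen : (lst ++ [x]).length = lst.length + 1 := by simp
  rw [hlen, List.range_succ, List.foldl_append]
  simp only [List.foldl_cons, List.foldl_nil]
  rw [if_pos (by simp [pv_cond_testBit, pv_testBit_high c lst.length hc])]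
  have hx : (lst ++ [x]).getD lst.length 0 = x := by
    simp
  rw [hx]
  congr 1
  apply PySem.List.foldl_congr_mem
  intro acc pos hpos
  have hlt : pos < lst.length := List.mem_range.mp hpos
  have hbit : ((2 ^ lst.length + c) &&& (1 <<< pos) > 0) ↔ (c &&& (1 <<< pos) > 0) := by
    rw [pv_cond_testBit, pv_cond_testBit, pv_testBit_low c lst.length pos hlt]
  by_cases h : c &&& (1 <<< pos) > 0
  · rw [if_pos (hbit.mpr h), if_pos h]
    simp [List.getElem?_append_left hlt]
  · rw [if_neg (fun hh => h (hbit.mp hh)), if_neg h]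

-- the heart: A's bitmask enumeration equals B's doubling enumeration
theorem pv_gen_eq (lst : List Int) :
    (List.range (2 ^ lst.length)).map (pvMaskSubset lst)
      = lst.foldl (fun result x => result ++ result.map (fun s => s ++ [x])) [[]] := by
  induction lst using List.reverseRecOn with
  | nil => decide
  | append_singleton lst x ih =>
    rw [List.foldl_append]
    simp only [List.foldl_cons, List.foldl_nil, ← ih]
    have hlen : (lst ++ [x]).length = lst.length + 1 := by simp
    rw [hlen, pow_succ, Nat.mul_two, List.range_add, List.map_append, List.map_map]
    congr 1
    · exact List.map_congr_left fun c hc => pv_mask_lo lst x c (List.mem_range.mp hc)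
    · rw [List.map_map]
      exact List.map_congr_left fun c hc => pv_mask_hi lst x c (List.mem_range.mp hc)

-- ===== VERDICT (by name: the statement is the Claim_ definition above) =====
theorem get_sorted_subsets_spec : Claim_equal_get_sorted_subsets := by
  intro lst _
  simp only [Spec_get_sorted_subsets, get_sorted_subsets, get_sorted_subsets_alt]
  rw [PySem.List.foldl_append_singleton_eq_map, List.nil_append, pv_gen_eq]
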